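-- pv_equiv track=rewrite | github.com/zimmra/klipper | scripts/fix_whitespace.py | try_break_operators
-- ===== SOURCE A (Python) =====
-- def try_break_operators(line, indent_str):
--     """Try to break on logical operators."""
--     operators = [' and ', ' or ', ' if ', ' else ']
--
--     for op in operators:
--         if op in line:
--             # Find the best place to break
--             parts = line.split(op)
--             if len(parts) > 1:
--                 # Try breaking after each operator
--                 for i in range(len(parts) - 1):
--                     left = op.join(parts[:i+1])
--                     right = op.join(parts[i+1:])
--                     if len(left) <= 80:
--                         continuation_indent = indent_str + '       '
--                         return left + op.strip() + '\n' + continuation_indent + right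
--
--     return line
-- ===== SOURCE B (Python) =====
-- def try_break_operators(line, indent_str):
--     """Try to break on logical operators."""
--     for op in [' and ', ' or ', ' if ', ' else ']:
--         idx = line.find(op)
--         if idx != -1 and idx <= 80:
--             return (line[:idx] + op.strip() + '\n'
--                     + indent_str + '       ' + line[idx + len(op):])
--     return line
-- ===== Notes on version B (the rewrite author's own statement) =====
-- stated objective: simpler
-- what changed: B drops A's split/inner join loop entirely: since the candidate prefixes only grow, only the first occurrence of each operator can satisfy the <=80 test, so B just uses line.find(op) once per operator and slices the line there.
import Mathlib
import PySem

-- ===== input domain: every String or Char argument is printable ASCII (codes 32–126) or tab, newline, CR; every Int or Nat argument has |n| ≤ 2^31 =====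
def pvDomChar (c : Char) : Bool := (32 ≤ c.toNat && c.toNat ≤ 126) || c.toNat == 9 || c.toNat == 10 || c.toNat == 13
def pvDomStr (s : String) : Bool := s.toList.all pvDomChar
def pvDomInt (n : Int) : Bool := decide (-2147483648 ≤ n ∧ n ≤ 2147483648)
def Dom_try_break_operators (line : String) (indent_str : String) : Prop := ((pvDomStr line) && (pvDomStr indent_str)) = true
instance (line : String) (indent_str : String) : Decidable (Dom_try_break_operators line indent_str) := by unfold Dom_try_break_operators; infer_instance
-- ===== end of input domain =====

-- B replaces A's split/join inner loop by a single line.find(op): only the first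
-- break point can ever satisfy the <=80 test, so the inner loop is dropped (objective: simpler).

-- ===== PORT A =====
-- inner loop: 'for i in range(len(parts) - 1): ... return' with early return as Option
def tboInner (op : String) (indent_str : String) (parts : List String) : List Int → Option String
  | [] => none
  | i :: is =>
    let left := PySem.Str.join op (PySem.List.slice parts none (some (i + 1)))
    let right := PySem.Str.join op (PySem.List.slice parts (some (i + 1)) none)
    if PySem.Str.len left ≤ 80 then
      some (left ++ PySem.Str.strip op ++ "\n" ++ (indent_str ++ "       ") ++ right)
    else
      tboInner op indent_str parts is

-- outer loop: 'for op in operators' with early return from the inner loop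
def tboOuter (line : String) (indent_str : String) : List String → String
  | [] => line
  | op :: ops =>
    if PySem.Str.isIn op line then
      -- every op literal is nonempty, so line.split(op) never raises: split? is `some` and getD [] is its value
      let parts := (PySem.Str.split? line op).getD []
      if 1 < parts.length then
        match tboInner op indent_str parts (PySem.List.pyRange 0 ((parts.length : Int) - 1)) with
        | some r => r
        | none => tboOuter line indent_str ops
      else tboOuter line indent_str ops
    else tboOuter line indent_str ops

def try_break_operators (line : String) (indent_str : String) : String :=
  tboOuter line indent_str [" and ", " or ", " if ", " else "]

-- ===== PORT B =====
def tboAltGo (line : String) (indent_str : String) : List String → String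
  | [] => line
  | op :: ops =>
    let idx := PySem.Str.find line op
    if idx ≠ -1 ∧ idx ≤ 80 then
      PySem.Str.slice line none (some idx) ++ PySem.Str.strip op ++ "\n"
        ++ indent_str ++ "       " ++ PySem.Str.slice line (some (idx + PySem.Str.len op)) none
    else tboAltGo line indent_str ops

def try_break_operators_alt (line : String) (indent_str : String) : String :=
  tboAltGo line indent_str [" and ", " or ", " if ", " else "]

-- ===== PRECONDITION & SPEC =====
def Spec_try_break_operators (line : String) (indent_str : String) (out : String) : Prop := out = try_break_operators_alt line indent_str
instance (line : String) (indent_str : String) (out : String) : Decidable (Spec_try_break_operators line indent_str out) := by unfold Spec_try_break_operators; infer_instance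

-- ===== CLAIM (what is proved, stated in full; the proofs are below) =====
def Claim_equal_try_break_operators : Prop := ∀ (line : String) (indent_str : String), Dom_try_break_operators line indent_str → Spec_try_break_operators line indent_str (try_break_operators line indent_str)

-- ===== LEMMAS AND PROOFS =====


theorem tbo_go_nil (sep : List Char) (f : Nat) (cur : List Char) (acc : List (List Char)) :
    PySem.Chars.splitOn.go sep f [] cur acc = acc.reverse ++ [cur.reverse] := by
  cases f <;> rw [PySem.Chars.splitOn.go.eq_def] <;> simp

theorem tbo_go_fuel (sep : List Char) (hsep : sep ≠ []) :
    ∀ (fuel : Nat) (fuel' : Nat) (l cur : List Char) (acc : List (List Char)),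
      l.length ≤ fuel → l.length ≤ fuel' →
      PySem.Chars.splitOn.go sep fuel l cur acc = PySem.Chars.splitOn.go sep fuel' l cur acc := by
  have hs : 1 ≤ sep.length := List.length_pos_iff.mpr hsep
  intro fuel
  induction fuel with
  | zero =>
    intro fuel' l cur acc h1 h2
    have : l = [] := by cases l <;> simp_all
    subst this
    rw [tbo_go_nil, tbo_go_nil]
  | succ n ih =>
    intro fuel' l cur acc h1 h2
    cases l with
    | nil => rw [tbo_go_nil, tbo_go_nil]
    | cons c rest =>
      cases fuel' with
      | zero => simp at h2
      | succ m =>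
        rw [PySem.Chars.splitOn.go.eq_def, PySem.Chars.splitOn.go.eq_def]
        simp only []
        by_cases hp : sep.isPrefixOf (c :: rest) = true
        · simp only [hp, if_true]
          exact ih _ _ _ _ (by simp at h1 ⊢; omega) (by simp at h2 ⊢; omega)
        · simp only [hp]
          exact ih _ _ _ _ (by simp at h1 ⊢; omega) (by simp at h2 ⊢; omega)

theorem tbo_go_acc (sep : List Char) :
    ∀ (fuel : Nat) (l cur : List Char) (acc : List (List Char)),
      PySem.Chars.splitOn.go sep fuel l cur acc =
        acc.reverse ++ PySem.Chars.splitOn.go sep fuel l cur [] := by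
  intro fuel
  induction fuel with
  | zero =>
    intro l cur acc
    rw [PySem.Chars.splitOn.go.eq_def, PySem.Chars.splitOn.go.eq_def]
    simp
  | succ n ih =>
    intro l cur acc
    cases l with
    | nil => rw [tbo_go_nil, tbo_go_nil]; simp
    | cons c rest =>
      rw [PySem.Chars.splitOn.go.eq_def, PySem.Chars.splitOn.go.eq_def]
      simp only []
      by_cases hp : sep.isPrefixOf (c :: rest) = true
      · simp only [hp, if_true]
        rw [ih _ _ (cur.reverse :: acc), ih _ _ ([cur.reverse])]
        simp
      · simp only [hp, Bool.false_eq_true, if_false]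
        rw [ih _ _ acc]

theorem tbo_go_not_infix (sep : List Char) :
    ∀ (fuel : Nat) (l cur : List Char) (acc : List (List Char)),
      ¬ sep <:+: l → l.length ≤ fuel →
      PySem.Chars.splitOn.go sep fuel l cur acc = acc.reverse ++ [cur.reverse ++ l] := by
  intro fuel
  induction fuel with
  | zero =>
    intro l cur acc hinf h1
    have : l = [] := by cases l <;> simp_all
    subst this
    rw [tbo_go_nil]; simp
  | succ n ih =>
    intro l cur acc hinf h1
    cases l with
    | nil => rw [tbo_go_nil]; simp
    | cons c rest =>
      rw [PySem.Chars.splitOn.go.eq_def]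
      simp only []
      have hp : ¬ sep.isPrefixOf (c :: rest) = true := by
        intro h
        exact hinf (List.IsPrefix.isInfix (List.isPrefixOf_iff_prefix.mp h))
      simp only [hp]
      have hrest : ¬ sep <:+: rest := fun h => hinf (h.trans (List.suffix_cons c rest).isInfix)
      rw [ih rest (c :: cur) acc hrest (by simp at h1 ⊢; omega)]
      simp


theorem tbo_prefix_find_zero (l sep : List Char) (h : sep.isPrefixOf l) :
    PySem.Chars.find l sep = 0 := by
  have hpre : sep <+: l := List.isPrefixOf_iff_prefix.mp h
  have hinf : sep <:+: l := hpre.isInfix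
  have hnn : 0 ≤ PySem.Chars.find l sep := (PySem.Chars.find_nonneg_iff l sep).mpr hinf
  obtain ⟨h1, h2⟩ := PySem.Chars.find_spec hnn
  by_contra hne
  have hpos : 0 < (PySem.Chars.find l sep).toNat := by omega
  exact h2 0 hpos (by simpa using hpre)

theorem tbo_find_range (l sep : List Char) (h : sep <:+: l) :
    (PySem.Chars.find l sep).toNat + sep.length ≤ l.length ∧
      sep <+: l.drop (PySem.Chars.find l sep).toNat := by
  have hnn : 0 ≤ PySem.Chars.find l sep := (PySem.Chars.find_nonneg_iff l sep).mpr h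
  obtain ⟨h1, h2⟩ := PySem.Chars.find_spec hnn
  refine ⟨?_, h1⟩
  have := h1.length_le
  simp at this
  have hle : PySem.Chars.find l sep ≤ (l.length : Int) := PySem.Chars.find_le_length l sep
  omega

theorem tbo_find_cons (c : Char) (rest sep : List Char)
    (hnp : ¬ sep.isPrefixOf (c :: rest) = true) (hinf : sep <:+: (c :: rest)) :
    PySem.Chars.find (c :: rest) sep = PySem.Chars.find rest sep + 1 ∧ sep <:+: rest := by
  have hnn : 0 ≤ PySem.Chars.find (c :: rest) sep := (PySem.Chars.find_nonneg_iff _ _).mpr hinf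
  obtain ⟨h1, h2⟩ := PySem.Chars.find_spec hnn
  set k := (PySem.Chars.find (c :: rest) sep).toNat with hk
  have hkpos : 0 < k := by
    rcases Nat.eq_zero_or_pos k with h0 | h
    · exfalso
      rw [h0] at h1
      simp at h1
      exact hnp (List.isPrefixOf_iff_prefix.mpr h1)
    · exact h
  -- sep is a prefix of drop (k-1) rest
  have hdrop : List.drop k (c :: rest) = List.drop (k - 1) rest := by
    have hke : k = (k - 1) + 1 := by omega
    conv_lhs => rw [hke, List.drop_succ_cons]
  have hrinf : sep <:+: rest := by
    have : sep <+: List.drop (k - 1) rest := hdrop ▸ h1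
    exact this.isInfix.trans (List.drop_suffix _ _).isInfix
  have hnn' : 0 ≤ PySem.Chars.find rest sep := (PySem.Chars.find_nonneg_iff _ _).mpr hrinf
  obtain ⟨h1', h2'⟩ := PySem.Chars.find_spec hnn'
  set k' := (PySem.Chars.find rest sep).toNat with hk'
  have e1 : k ≤ k' + 1 := by
    by_contra hlt
    exact h2 (k' + 1) (by omega) (by simpa using h1')
  have e2 : k' ≤ k - 1 := by
    by_contra hlt
    exact h2' (k - 1) (by omega) (hdrop ▸ h1)
  have : k = k' + 1 := by omega
  refine ⟨?_, hrinf⟩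
  omega

theorem tbo_go_infix (sep : List Char) (hsep : sep ≠ []) :
    ∀ (fuel : Nat) (l cur : List Char) (acc : List (List Char)),
      sep <:+: l → l.length ≤ fuel →
      PySem.Chars.splitOn.go sep fuel l cur acc =
        PySem.Chars.splitOn.go sep (fuel - 1 - (PySem.Chars.find l sep).toNat)
          (l.drop ((PySem.Chars.find l sep).toNat + sep.length)) []
          ((cur.reverse ++ l.take (PySem.Chars.find l sep).toNat) :: acc) := by
  have hs : 1 ≤ sep.length := List.length_pos_iff.mpr hsep
  intro fuel
  induction fuel with
  | zero =>
    intro l cur acc hinf h1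
    have : l = [] := by cases l <;> simp_all
    subst this
    exact absurd (List.eq_nil_of_infix_nil hinf) hsep
  | succ n ih =>
    intro l cur acc hinf h1
    cases l with
    | nil => exact absurd (List.eq_nil_of_infix_nil hinf) hsep
    | cons c rest =>
      rw [PySem.Chars.splitOn.go.eq_def]
      simp only []
      by_cases hp : sep.isPrefixOf (c :: rest) = true
      · simp only [hp, if_true]
        rw [tbo_prefix_find_zero _ _ hp]
        simp
      · simp only [hp, Bool.false_eq_true, if_false]
        obtain ⟨hfc, hrinf⟩ := tbo_find_cons c rest sep hp hinf
        have hnn' : 0 ≤ PySem.Chars.find rest sep := (PySem.Chars.find_nonneg_iff _ _).mpr hrinf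
        rw [ih rest (c :: cur) acc hrinf (by simp at h1 ⊢; omega)]
        rw [hfc]
        have e1 : (PySem.Chars.find rest sep + 1).toNat = (PySem.Chars.find rest sep).toNat + 1 := by omega
        rw [e1]
        have e2 : n + 1 - 1 - ((PySem.Chars.find rest sep).toNat + 1) = n - 1 - (PySem.Chars.find rest sep).toNat := by omega
        have e3 : (PySem.Chars.find rest sep).toNat + 1 + sep.length = ((PySem.Chars.find rest sep).toNat + sep.length) + 1 := by omega
        rw [e2, e3, List.drop_succ_cons, List.take_succ_cons]
        simp

theorem tbo_splitOn_neg (l sep : List Char) (hsep : sep ≠ []) (h : ¬ sep <:+: l) :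
    PySem.Chars.splitOn l sep = [l] := by
  unfold PySem.Chars.splitOn
  rw [tbo_go_not_infix sep _ l [] [] h (by omega)]
  simp

theorem tbo_splitOn_pos (l sep : List Char) (hsep : sep ≠ []) (h : sep <:+: l) :
    PySem.Chars.splitOn l sep =
      l.take (PySem.Chars.find l sep).toNat ::
        PySem.Chars.splitOn (l.drop ((PySem.Chars.find l sep).toNat + sep.length)) sep := by
  have hs : 1 ≤ sep.length := List.length_pos_iff.mpr hsep
  obtain ⟨hrange, _⟩ := tbo_find_range l sep h
  unfold PySem.Chars.splitOn
  rw [tbo_go_infix sep hsep _ l [] [] h (by omega)]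
  rw [tbo_go_acc]
  have hd : (l.drop ((PySem.Chars.find l sep).toNat + sep.length)).length
      ≤ l.length + 1 - 1 - (PySem.Chars.find l sep).toNat := by
    simp; omega
  rw [tbo_go_fuel sep hsep _ ((l.drop ((PySem.Chars.find l sep).toNat + sep.length)).length + 1) _ _ _ hd (by omega)]
  simp

theorem tbo_splitOn_ne_nil (l sep : List Char) (hsep : sep ≠ []) :
    PySem.Chars.splitOn l sep ≠ [] := by
  by_cases h : sep <:+: l
  · rw [tbo_splitOn_pos l sep hsep h]; simp
  · rw [tbo_splitOn_neg l sep hsep h]; simp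

theorem tbo_join_splitOn (sep : List Char) (hsep : sep ≠ []) :
    ∀ l, PySem.Chars.join sep (PySem.Chars.splitOn l sep) = l := by
  have hs : 1 ≤ sep.length := List.length_pos_iff.mpr hsep
  intro l
  induction hn : l.length using Nat.strong_induction_on generalizing l with
  | _ n ih =>
  subst hn
  by_cases h : sep <:+: l
  · obtain ⟨hrange, hpre⟩ := tbo_find_range l sep h
    rw [tbo_splitOn_pos l sep hsep h]
    set k := (PySem.Chars.find l sep).toNat with hk
    have hrec : PySem.Chars.join sep (PySem.Chars.splitOn (l.drop (k + sep.length)) sep)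
        = l.drop (k + sep.length) := ih _ (by simp; omega) _ rfl
    cases hsp : PySem.Chars.splitOn (l.drop (k + sep.length)) sep with
    | nil => exact absurd hsp (tbo_splitOn_ne_nil _ sep hsep)
    | cons p ps =>
      rw [hsp] at hrec
      rw [PySem.Chars.join_cons_cons]
      rw [hrec]
      obtain ⟨t, ht⟩ := hpre
      have hdk : l.drop k = sep ++ t := ht.symm
      have htt : t = l.drop (k + sep.length) := by
        have := congrArg (List.drop sep.length) hdk
        simpa [List.drop_drop, Nat.add_comm] using this.symm
      calc l.take k ++ sep ++ l.drop (k + sep.length)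
          = l.take k ++ (sep ++ t) := by rw [← htt]; simp
        _ = l.take k ++ l.drop k := by rw [← hdk]
        _ = l := List.take_append_drop k l
  · rw [tbo_splitOn_neg l sep hsep h, PySem.Chars.join_singleton]

theorem tbo_join_head_le (sep p : List Char) (ps : List (List Char)) :
    p.length ≤ (PySem.Chars.join sep (p :: ps)).length := by
  cases ps with
  | nil => rw [PySem.Chars.join_singleton]
  | cons q qs => rw [PySem.Chars.join_cons_cons]; simp

theorem tbo_pyRange_nonneg : ∀ (b i : Int), i ∈ PySem.List.pyRange 0 b → 0 ≤ i := by
  intro b i h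
  rw [PySem.List.pyRange_one] at h
  simp at h
  obtain ⟨k, _, hk⟩ := h
  omega

theorem tbo_inner_none (op indent_str : String) (k : Nat) (hk : 80 < k)
    (p0 : List Char) (hp0 : p0.length = k) (tl : List String) :
    ∀ is : List Int, (∀ i ∈ is, 0 ≤ i) →
      tboInner op indent_str (String.ofList p0 :: tl) is = none := by
  intro is
  induction is with
  | nil => intro _; rfl
  | cons i is' ih =>
    intro hnn
    have hi : 0 ≤ i := hnn i (by simp)
    rw [tboInner]
    have hslice : PySem.List.slice (String.ofList p0 :: tl) none (some (i + 1))
        = String.ofList p0 :: List.take i.toNat tl := by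
      rw [PySem.List.slice_to _ (by omega)]
      have : (i + 1).toNat = i.toNat + 1 := by omega
      rw [this, List.take_succ_cons]
    have hlen : ¬ (PySem.Str.len (PySem.Str.join op (PySem.List.slice (String.ofList p0 :: tl) none (some (i + 1)))) ≤ 80) := by
      rw [hslice]
      unfold PySem.Str.len
      rw [PySem.Str.toList_join]
      have h1 : p0.length ≤ (PySem.Chars.join op.toList
          (List.map String.toList (String.ofList p0 :: List.take i.toNat tl))).length := by
        simp only [List.map_cons, String.toList_ofList]
        exact tbo_join_head_le _ _ _
      intro hc
      have : ((PySem.Chars.join op.toList (List.map String.toList (String.ofList p0 :: List.take i.toNat tl))).length : Int) ≤ 80 := hc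
      omega
    simp only [hlen, if_false]
    exact ih (fun j hj => hnn j (by simp [hj]))

theorem tbo_str_join_singleton (op p : String) : PySem.Str.join op [p] = p := by
  rw [← String.toList_inj, PySem.Str.toList_join]
  simp [PySem.Chars.join_singleton]

theorem tbo_step (line indent_str op : String) (ops : List String) (hsep : op.toList ≠ [])
    (ih : tboOuter line indent_str ops = tboAltGo line indent_str ops) :
    tboOuter line indent_str (op :: ops) = tboAltGo line indent_str (op :: ops) := by
  have hs : 1 ≤ op.toList.length := List.length_pos_iff.mpr hsep
  rw [tboOuter, tboAltGo]
  by_cases hin : PySem.Str.isIn op line = true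
  · have hinf : op.toList <:+: line.toList := (PySem.Str.isIn_iff_infix op line).mp hin
    have hnn : 0 ≤ PySem.Chars.find line.toList op.toList :=
      (PySem.Chars.find_nonneg_iff _ _).mpr hinf
    set k := (PySem.Chars.find line.toList op.toList).toNat with hkdef
    obtain ⟨hrange, hpre⟩ := tbo_find_range line.toList op.toList hinf
    have hfind : PySem.Str.find line op = (k : Int) := by
      unfold PySem.Str.find; omega
    have hsplit : PySem.Str.split? line op
        = some (List.map String.ofList (PySem.Chars.splitOn line.toList op.toList)) := by
      unfold PySem.Str.split? PySem.Chars.split?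
      simp [List.isEmpty_iff, hsep]
    have hsp := tbo_splitOn_pos line.toList op.toList hsep hinf
    set d := line.toList.drop (k + op.toList.length) with hddef
    set ps := PySem.Chars.splitOn d op.toList with hpsdef
    have hpsne : ps ≠ [] := tbo_splitOn_ne_nil d op.toList hsep
    have hparts : (PySem.Str.split? line op).getD []
        = String.ofList (line.toList.take k) :: List.map String.ofList ps := by
      rw [hsplit]
      simp only [Option.getD_some, hsp, ← hkdef, List.map_cons]
    simp only [hin, if_true]
    rw [hparts]
    have hlen2 : 1 < (String.ofList (line.toList.take k) :: List.map String.ofList ps).length := by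
      simp only [List.length_cons, List.length_map]
      have := List.length_pos_iff.mpr hpsne
      omega
    simp only [hlen2, if_true]
    have hkle : k ≤ line.toList.length := by omega
    by_cases hk80 : (k : Int) ≤ 80
    · -- first break point fits: both return the broken line
      have hcons : PySem.List.pyRange 0 (((String.ofList (line.toList.take k) :: List.map String.ofList ps).length : Int) - 1)
          = 0 :: PySem.List.pyRange 1 (((String.ofList (line.toList.take k) :: List.map String.ofList ps).length : Int) - 1) := by
        rw [PySem.List.pyRange_one_cons (by omega)]
        norm_num
      rw [hcons, tboInner]
      have hslice1 : PySem.List.slice (String.ofList (line.toList.take k) :: List.map String.ofList ps) none (some ((0:Int) + 1))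
          = [String.ofList (line.toList.take k)] := by
        rw [PySem.List.slice_to _ (by omega)]
        norm_num
      have hslice2 : PySem.List.slice (String.ofList (line.toList.take k) :: List.map String.ofList ps) (some ((0:Int) + 1)) none
          = List.map String.ofList ps := by
        rw [PySem.List.slice_from _ (by omega)]
        norm_num
      rw [hslice1, hslice2, tbo_str_join_singleton]
      have hlenleft : PySem.Str.len (String.ofList (line.toList.take k)) = (k : Int) := by
        unfold PySem.Str.len
        rw [String.toList_ofList, List.length_take]
        omega
      rw [hlenleft]
      simp only [hk80, if_true]
      have hcond : PySem.Str.find line op ≠ -1 ∧ PySem.Str.find line op ≤ 80 := by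
        rw [hfind]; constructor <;> omega
      simp only [hfind, if_pos (hfind ▸ hcond)]
      -- both strings are equal, compare as char lists
      rw [← String.toList_inj]
      simp only [String.toList_append, PySem.Str.toList_join, PySem.Str.toList_slice,
        PySem.Chars.slice_eq_listSlice, String.toList_ofList]
      rw [PySem.List.slice_to _ (by omega : (0:Int) ≤ (k:Int)),
          PySem.List.slice_from _ (by unfold PySem.Str.len; omega)]
      have hmm : List.map String.toList (List.map String.ofList ps) = ps := by
        simp [List.map_map, Function.comp_def]
      rw [hmm]
      have hjoin : PySem.Chars.join op.toList ps = d := hpsdef ▸ tbo_join_splitOn op.toList hsep d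
      rw [hjoin]
      have htn1 : ((k:Int)).toNat = k := by omega
      have htn2 : ((k:Int) + PySem.Str.len op).toNat = k + op.toList.length := by
        unfold PySem.Str.len; omega
      rw [htn1, htn2]
      simp [hddef]
    · -- first break point already longer than 80: A's inner loop fails on every i
      have hnone : tboInner op indent_str (String.ofList (line.toList.take k) :: List.map String.ofList ps)
          (PySem.List.pyRange 0 (((String.ofList (line.toList.take k) :: List.map String.ofList ps).length : Int) - 1)) = none := by
        refine tbo_inner_none op indent_str k (by omega) (line.toList.take k) (by rw [List.length_take]; omega) _ _ ?_
        intro i hi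
        exact tbo_pyRange_nonneg _ i hi
      rw [hnone]
      have hcond : ¬ (PySem.Str.find line op ≠ -1 ∧ PySem.Str.find line op ≤ 80) := by
        rw [hfind]
        push Not
        intro _
        omega
      simp only [if_neg hcond]
      exact ih
  · have hninf : ¬ op.toList <:+: line.toList := fun h => hin ((PySem.Str.isIn_iff_infix op line).mpr h)
    have hfind : PySem.Str.find line op = -1 := by
      unfold PySem.Str.find
      exact (PySem.Chars.find_eq_neg_one_iff _ _).mpr hninf
    have hcond : ¬ (PySem.Str.find line op ≠ -1 ∧ PySem.Str.find line op ≤ 80) := by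
      rw [hfind]; simp
    simp only [hin, Bool.false_eq_true, if_false, if_neg hcond]
    exact ih

-- ===== VERDICT (by name: the statement is the Claim_ definition above) =====
theorem try_break_operators_spec : Claim_equal_try_break_operators := by
  intro line indent_str _
  unfold Spec_try_break_operators try_break_operators try_break_operators_alt
  refine tbo_step _ _ _ _ (by decide) ?_
  refine tbo_step _ _ _ _ (by decide) ?_
  refine tbo_step _ _ _ _ (by decide) ?_
  refine tbo_step _ _ _ _ (by decide) ?_
  rfl
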